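-- pv_equiv track=rewrite | github.com/THLPH/Python-2024 | frequency_and_sequence_analysis.py | freq_num
-- ===== SOURCE A (Python) =====
-- def freq_num(lst):
--     count = {}
--     for n in lst:
--         if n in count:
--             count[n] += 1
--         else:
--             count[n] = 1
--     most = min([num for num, freq in count.items() if freq == max(count.values())])
--     return most
-- ===== SOURCE B (Python) =====
-- def freq_num(lst):
--     # Sort, then scan maximal runs of equal values; a strictly longer run wins,
--     # so the first (smallest) value attaining the maximal count is kept.
--     s = sorted(lst)
--     best_val = s[0]
--     best_cnt = 0
--     i = 0
--     n = len(s)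
--     while i < n:
--         j = i
--         while j < n and s[j] == s[i]:
--             j += 1
--         if j - i > best_cnt:
--             best_cnt = j - i
--             best_val = s[i]
--         i = j
--     return best_val
-- ===== Notes on version B (the rewrite author's own statement) =====
-- stated objective: faster
-- what changed: Replaces the frequency dict plus min-over-items comprehension (which re-evaluates max(count.values()) once per dict entry, quadratic in the number of distinct values) by sorting the list and scanning its maximal runs of equal values, keeping the first (hence smallest) value whose run is strictly longest.
import Mathlib
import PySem

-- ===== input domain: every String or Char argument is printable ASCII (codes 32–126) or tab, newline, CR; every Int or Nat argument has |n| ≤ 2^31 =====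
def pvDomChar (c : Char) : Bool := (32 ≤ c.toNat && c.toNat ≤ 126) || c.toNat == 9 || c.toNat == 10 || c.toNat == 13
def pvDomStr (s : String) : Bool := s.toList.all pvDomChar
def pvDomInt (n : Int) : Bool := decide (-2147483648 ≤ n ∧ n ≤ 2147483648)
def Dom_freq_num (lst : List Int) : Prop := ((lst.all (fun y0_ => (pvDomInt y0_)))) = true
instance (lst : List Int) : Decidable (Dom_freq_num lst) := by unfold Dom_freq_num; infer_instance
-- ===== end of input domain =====

-- B sorts the list and scans maximal runs of equal values instead of building a frequency dict and re-scanning it; same return value on every non-empty list.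

-- ===== PORT A =====
def freq_num (lst : List Int) : Int :=
  let count : PySem.Dict Int Int :=
    lst.foldl (fun d n =>
      if d.contains n then d.insert n (d.getD n 0 + 1) else d.insert n 1)
      PySem.Dict.empty
  -- max(count.values()) is a constant inside the comprehension; computed once here
  let m : Int := (PySem.List.max? count.values (fun v => v)).getD 0
  let cands : List Int := (count.items.filter (fun p => p.2 == m)).map (fun p => p.1)
  (PySem.List.min? cands (fun v => v)).getD 0

-- ===== PORT B =====
-- the inner while loop of Source B counts the current run: j - i = length of takeWhile (== s[i]);
-- i = j resumes right after the run, i.e. on dropWhile (== s[i]).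
def runScan : List Int → Int → Int → Int
  | [], bv, _ => bv
  | x :: xs, bv, bc =>
    let k : Int := ((x :: xs).takeWhile (fun y => y == x)).length
    let rest := (x :: xs).dropWhile (fun y => y == x)
    if k > bc then runScan rest x k else runScan rest bv bc
termination_by s _ _ => s.length
decreasing_by
  all_goals
    simp only [List.dropWhile_cons, BEq.rfl, if_true]
    exact Nat.lt_succ_of_le (List.length_dropWhile_le _ _)

def freq_num_alt (lst : List Int) : Int :=
  let s := PySem.List.sorted lst (fun v => v) false
  match s with
  | [] => 0   -- Python raises IndexError (s[0]) here; excluded by Pre_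
  | x :: xs => runScan (x :: xs) x 0

-- ===== PRECONDITION & SPEC =====
-- Pre_ excludes only the empty list, on which A raises ValueError (min() of an empty list) and B raises IndexError (s[0]).
def Pre_freq_num (lst : List Int) : Prop := lst ≠ []
instance (lst : List Int) : Decidable (Pre_freq_num lst) := by unfold Pre_freq_num; infer_instance
def pvWitness_freq_num : List Int := [3, 1, 3, 2]
def Spec_freq_num (lst : List Int) (out : Int) : Prop := out = freq_num_alt lst
instance (lst : List Int) (out : Int) : Decidable (Spec_freq_num lst out) := by unfold Spec_freq_num; infer_instance

-- ===== CLAIM (what is proved, stated in full; the proofs are below) =====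
def Claim_equal_freq_num : Prop := ∀ (lst : List Int), Dom_freq_num lst → Pre_freq_num lst → Spec_freq_num lst (freq_num lst)

-- ===== LEMMAS AND PROOFS =====

-- proof-only helpers: runScan viewed over the run-compressed list of (value, count) pairs
def pickBy : List (Int × Int) → Int → Int → Int
  | [], bv, _ => bv
  | (v, c) :: t, bv, bc => if c > bc then pickBy t v c else pickBy t bv bc

def maxC (ps : List (Int × Int)) (bc : Int) : Int := ps.foldl (fun a p => max a p.2) bc

lemma maxC_cons (v c bc : Int) (t : List (Int × Int)) : maxC ((v,c) :: t) bc = maxC t (max bc c) := rfl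

lemma le_maxC (ps : List (Int × Int)) : ∀ bc, bc ≤ maxC ps bc := by
  induction ps with
  | nil => intro bc; simp [maxC]
  | cons p t ih =>
    intro bc
    rw [show (p :: t) = (p.1, p.2) :: t from rfl, maxC_cons]
    exact le_trans (le_max_left _ _) (ih _)

lemma maxC_ge_mem (ps : List (Int × Int)) : ∀ bc p, p ∈ ps → p.2 ≤ maxC ps bc := by
  induction ps with
  | nil => intro bc p hp; simp at hp
  | cons q t ih =>
    intro bc p hp
    rw [show (q :: t) = (q.1, q.2) :: t from rfl, maxC_cons]
    rcases List.mem_cons.1 hp with rfl | hp'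
    · exact le_trans (le_max_right bc p.2) (le_maxC t _)
    · exact ih _ p hp'

lemma maxC_mem (ps : List (Int × Int)) : ∀ bc, maxC ps bc = bc ∨ ∃ p ∈ ps, p.2 = maxC ps bc := by
  induction ps with
  | nil => intro bc; left; rfl
  | cons q t ih =>
    intro bc
    rw [show (q :: t) = (q.1, q.2) :: t from rfl, maxC_cons]
    rcases ih (max bc q.2) with h | ⟨p, hp, he⟩
    · rw [h]
      by_cases hle : q.2 ≤ bc
      · left; omega
      · right; exact ⟨(q.1, q.2), List.mem_cons_self, by simp; omega⟩
    · right; exact ⟨p, List.mem_cons_of_mem _ hp, he⟩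

lemma pickBy_spec (ps : List (Int × Int)) : ∀ bv bc,
    pickBy ps bv bc =
      match (ps.filter (fun p => decide (bc < p.2 ∧ p.2 = maxC ps bc))).head? with
      | some p => p.1
      | none => bv := by
  induction ps with
  | nil => intro bv bc; simp [pickBy]
  | cons p t ih =>
    obtain ⟨v, c⟩ := p
    intro bv bc
    rw [maxC_cons]
    by_cases h : c > bc
    · rw [show pickBy ((v,c)::t) bv bc = pickBy t v c from by simp [pickBy, h], ih]
      rw [show max bc c = c from by omega]
      by_cases hM : maxC t c = c
      · have hnil : t.filter (fun p => decide (c < p.2 ∧ p.2 = maxC t c)) = [] := by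
          apply List.filter_eq_nil_iff.2
          intro p hp
          simp only [decide_eq_true_eq, not_and]
          intro hc hpc
          omega
        rw [hnil, List.filter_cons_of_pos (by simp [hM]; omega)]
        rfl
      · have hgt : c < maxC t c := lt_of_le_of_ne (le_maxC t c) (Ne.symm hM)
        have hcong : t.filter (fun p => decide (c < p.2 ∧ p.2 = maxC t c))
            = t.filter (fun p => decide (bc < p.2 ∧ p.2 = maxC t c)) := by
          apply List.filter_congr
          intro p _
          apply decide_eq_decide.2
          constructor <;> (rintro ⟨h1, h2⟩; exact ⟨by omega, h2⟩)
        rw [hcong, List.filter_cons_of_neg (by simp; intro _; omega)]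
        rcases maxC_mem t c with hc | ⟨p, hp, he⟩
        · omega
        · have hne : t.filter (fun p => decide (bc < p.2 ∧ p.2 = maxC t c)) ≠ [] := by
            intro hcontra
            have := List.filter_eq_nil_iff.1 hcontra p hp
            simp only [decide_eq_true_eq, not_and] at this
            exact this (by omega) he
          obtain ⟨hd, tl, heq⟩ := List.exists_cons_of_ne_nil hne
          rw [heq]; rfl
    · rw [show pickBy ((v,c)::t) bv bc = pickBy t bv bc from by simp [pickBy, h], ih]
      rw [show max bc c = bc from by omega]
      rw [List.filter_cons_of_neg (by simp; intro _; omega)]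

lemma dropWhile_head_false (l t : List Int) (p : Int → Bool) (a : Int)
    (h : l.dropWhile p = a :: t) : p a = false := by
  have hne : l.dropWhile p ≠ [] := by rw [h]; simp
  have h1 := List.head_dropWhile_not p hne
  have h2 : (l.dropWhile p).head hne = a := by simp [h]
  rw [h2] at h1
  simpa using h1

lemma runScan_eq_pickBy : ∀ (n : Nat) (s : List Int), s.length ≤ n → s.Pairwise (· ≤ ·) →
    ∀ (V : List Int), V.Pairwise (· < ·) → (∀ v, v ∈ V ↔ v ∈ s) → ∀ bv bc,
    runScan s bv bc = pickBy (V.map (fun v => (v, (List.count v s : Int)))) bv bc := by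
  intro n
  induction n with
  | zero =>
    intro s hlen _ V _ hmem bv bc
    have hs : s = [] := by cases s <;> simp_all
    subst hs
    have hV : V = [] := by
      cases V with
      | nil => rfl
      | cons v t => exact absurd ((hmem v).1 List.mem_cons_self) (by simp)
    subst hV
    simp [runScan, pickBy]
  | succ n ih =>
    intro s hlen hs V hV hmem bv bc
    match s, hlen, hs, hmem with
    | [], _, _, hmem =>
      have hV : V = [] := by
        cases V with
        | nil => rfl
        | cons v t => exact absurd ((hmem v).1 List.mem_cons_self) (by simp)
      subst hV
      simp [runScan, pickBy]
    | x :: xs, hlen, hs, hmem =>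
      -- split the sorted list as its first run (replicate k x) plus a strictly larger rest
      have hxle : ∀ y ∈ xs, x ≤ y := (List.pairwise_cons.1 hs).1
      have hdw : (x :: xs).dropWhile (fun y => y == x) = xs.dropWhile (fun y => y == x) := by
        simp [List.dropWhile]
      set rest := (x :: xs).dropWhile (fun y => y == x) with hrest
      set k := ((x :: xs).takeWhile (fun y => y == x)).length with hk
      have hrepl : (x :: xs).takeWhile (fun y => y == x) = List.replicate k x := by
        rw [hk]
        apply List.eq_replicate_of_mem
        intro y hy
        have := List.mem_takeWhile_imp hy; simpa using this
      have hsplit : x :: xs = List.replicate k x ++ rest := by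
        rw [← hrepl, hrest, List.takeWhile_append_dropWhile]
      have hrest_sub : rest.Sublist xs := hdw ▸ List.dropWhile_sublist _
      have hrest_len : rest.length ≤ n := by
        have := List.Sublist.length_le hrest_sub
        simp only [List.length_cons] at hlen
        omega
      have hrest_sorted : rest.Pairwise (· ≤ ·) :=
        List.Pairwise.sublist hrest_sub (List.pairwise_cons.1 hs).2
      have hrest_gt : ∀ y ∈ rest, x < y := by
        intro y hy
        cases hr : rest with
        | nil => rw [hr] at hy; simp at hy
        | cons h r' =>
          have hhne : h ≠ x := by
            have := dropWhile_head_false (x :: xs) r' (fun y => y == x) h (by rw [← hrest, hr])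
            simpa using this
          have hhx : x ≤ h := hxle h (hrest_sub.mem (hr ▸ List.mem_cons_self))
          rw [hr] at hy
          rcases List.mem_cons.1 hy with rfl | hy'
          · exact lt_of_le_of_ne hhx (Ne.symm hhne)
          · have h2 : h ≤ y := ((List.pairwise_cons.1 (hr ▸ hrest_sorted)).1) y hy'
            have := lt_of_le_of_ne hhx (Ne.symm hhne)
            omega
      have hk1 : 1 ≤ k := by
        rw [hk, List.takeWhile_cons_of_pos (by simp)]; simp
      have hcx : (x :: xs).count x = k := by
        rw [hsplit]
        have : rest.count x = 0 := by
          rw [List.count_eq_zero]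
          intro hx
          exact absurd (hrest_gt x hx) (lt_irrefl x)
        simp [this]
      have hcv : ∀ v : Int, v ≠ x → (x :: xs).count v = rest.count v := by
        intro v hv
        rw [hsplit]
        simp [List.count_replicate]
        intro he; exact absurd he.symm hv
      -- V splits as x :: V'
      have hxV : x ∈ V := (hmem x).2 List.mem_cons_self
      obtain ⟨V', rfl⟩ : ∃ V', V = x :: V' := by
        cases V with
        | nil => simp at hxV
        | cons v0 V' =>
          refine ⟨V', ?_⟩
          have hv0 : v0 = x := by
            have hv0s : v0 ∈ x :: xs := (hmem v0).1 List.mem_cons_self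
            have hxlev0 : x ≤ v0 := by
              rcases List.mem_cons.1 hv0s with rfl | hv0xs
              · rfl
              · exact hxle _ hv0xs
            rcases List.mem_cons.1 hxV with rfl | hxV'
            · rfl
            · have := (List.pairwise_cons.1 hV).1 x hxV'
              omega
          rw [hv0]
      have hV'p : V'.Pairwise (· < ·) := (List.pairwise_cons.1 hV).2
      have hV'lt : ∀ v ∈ V', x < v := (List.pairwise_cons.1 hV).1
      have hmem' : ∀ v, v ∈ V' ↔ v ∈ rest := by
        intro v
        constructor
        · intro hv
          have hvx : x < v := hV'lt v hv
          have hvs : v ∈ x :: xs := (hmem v).1 (List.mem_cons_of_mem _ hv)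
          rw [hsplit] at hvs
          rcases List.mem_append.1 hvs with hrep | hr
          · have := List.eq_of_mem_replicate hrep; omega
          · exact hr
        · intro hv
          have hvx : x < v := hrest_gt v hv
          have hvs : v ∈ x :: V' := (hmem v).2 (hsplit ▸ List.mem_append.2 (Or.inr hv))
          rcases List.mem_cons.1 hvs with rfl | hv'
          · omega
          · exact hv'
      -- one step of runScan and of pickBy, then the induction hypothesis on rest
      rw [show runScan (x :: xs) bv bc
          = if (k : Int) > bc then runScan rest x (k : Int) else runScan rest bv bc from by
        rw [runScan]]
      have hmap : ((x :: V').map (fun v => (v, (List.count v (x :: xs) : Int))))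
          = (x, (k : Int)) :: V'.map (fun v => (v, (List.count v rest : Int))) := by
        simp only [List.map_cons, hcx]
        congr 1
        apply List.map_congr_left
        intro v hv
        have : v ≠ x := by have := hV'lt v hv; omega
        rw [hcv v this]
      rw [hmap]
      rw [show pickBy ((x, (k:Int)) :: V'.map (fun v => (v, (List.count v rest : Int)))) bv bc
          = if (k:Int) > bc then pickBy (V'.map (fun v => (v, (List.count v rest : Int)))) x k
            else pickBy (V'.map (fun v => (v, (List.count v rest : Int)))) bv bc from rfl]
      by_cases hcmp : (k : Int) > bc
      · simp only [hcmp, if_true]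
        exact ih rest hrest_len hrest_sorted V' hV'p hmem' x k
      · simp only [hcmp, if_false]
        exact ih rest hrest_len hrest_sorted V' hV'p hmem' bv bc

-- A's guarded update is the standard counter update (the guard only avoids a default lookup).
lemma freq_num_fold_eq_counter (lst : List Int) :
    lst.foldl (fun d n =>
      if d.contains n then d.insert n (d.getD n 0 + 1) else d.insert n 1)
      PySem.Dict.empty = PySem.Dict.counter lst := by
  rw [show (fun (d : PySem.Dict Int Int) n =>
        if d.contains n then d.insert n (d.getD n 0 + 1) else d.insert n 1)
      = (fun d n => d.insert n (d.getD n 0 + 1)) from ?_]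
  · exact PySem.Dict.foldl_insert_getD_add_one_eq_counter lst
  · funext d n
    by_cases h : d.contains n = true
    · simp [h]
    · simp only [Bool.not_eq_true] at h
      simp [h, PySem.Dict.getD_of_not_contains d 0 h]

lemma maxC_eq_foldl_map (ps : List (Int × Int)) (bc : Int) :
    maxC ps bc = (ps.map Prod.snd).foldl max bc := by
  rw [List.foldl_map]; rfl

-- ===== VERDICT (by name: the statement is the Claim_ definition above) =====
theorem freq_num_spec : Claim_equal_freq_num := by
  intro lst _ hpre
  unfold Pre_freq_num at hpre
  unfold Spec_freq_num
  -- A-side normal form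
  have hA : freq_num lst = (PySem.List.min? ((PySem.Set.ofList lst : List Int).filter
        (fun v => (List.count v lst : Int) == (PySem.List.max? ((PySem.Set.ofList lst : List Int).map (fun v => (List.count v lst : Int))) (fun v => v)).getD 0))
      (fun v => v)).getD 0 := by
    unfold freq_num
    rw [freq_num_fold_eq_counter]
    simp only [PySem.Dict.values, PySem.Dict.items_counter, List.map_map, List.filter_map,
      Function.comp_def, List.map_id']
  set c : Int → Int := fun v => (List.count v lst : Int) with hcdef
  set S : List Int := (PySem.Set.ofList lst : List Int) with hSdef
  set m : Int := (PySem.List.max? (S.map c) (fun v => v)).getD 0 with hmdef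
  set T : List Int := PySem.List.sorted S (fun v => v) false with hTdef
  -- B-side: sorted list is non-empty
  have hsne : PySem.List.sorted lst (fun v => v) false ≠ [] := by
    rw [Ne, PySem.List.sorted_eq_nil_iff]; exact hpre
  obtain ⟨x, xs, hsx⟩ := List.exists_cons_of_ne_nil hsne
  have hB : freq_num_alt lst = runScan (x :: xs) x 0 := by
    unfold freq_num_alt
    rw [hsx]
  have hsorted : (x :: xs).Pairwise (· ≤ ·) := by
    have := PySem.List.sorted_pairwise lst (fun v => v)
    rw [hsx] at this
    exact this
  have hTpair : T.Pairwise (· < ·) := PySem.List.sorted_ofList_pairwise_lt lst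
  have hmemlst : ∀ v : Int, v ∈ (x :: xs) ↔ v ∈ lst := by
    intro v
    rw [← hsx, PySem.List.mem_sorted]
  have hTmem : ∀ v : Int, v ∈ T ↔ v ∈ (x :: xs) := by
    intro v
    rw [hTdef, PySem.List.mem_sorted, hSdef, PySem.Set.mem_ofList, hmemlst]
  have hcnt : ∀ v : Int, List.count v (x :: xs) = List.count v lst := by
    intro v
    have := PySem.List.sorted_perm lst (fun v => v) false
    rw [hsx] at this
    exact this.count_eq v
  have hB2 : freq_num_alt lst = pickBy (T.map (fun v => (v, c v))) x 0 := by
    rw [hB, runScan_eq_pickBy (x :: xs).length (x :: xs) le_rfl hsorted T hTpair hTmem x 0]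
    congr 1
    apply List.map_congr_left
    intro v _
    rw [hcdef]
    simp only [hcnt v]
  set ps : List (Int × Int) := T.map (fun v => (v, c v)) with hpsdef
  set M : Int := maxC ps 0 with hMdef
  rw [pickBy_spec] at hB2
  -- m = M
  have hSne : S ≠ [] := by
    obtain ⟨y, ys, rfl⟩ := List.exists_cons_of_ne_nil hpre
    intro hSnil
    have : y ∈ S := by rw [hSdef, PySem.Set.mem_ofList]; exact List.mem_cons_self
    rw [hSnil] at this
    simp at this
  obtain ⟨v0, S', hSv⟩ := List.exists_cons_of_ne_nil hSne
  have hc_nonneg : ∀ v : Int, 0 ≤ c v := by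
    intro v; rw [hcdef]; positivity
  have hmM : m = M := by
    rw [hMdef, maxC_eq_foldl_map, hpsdef, List.map_map]
    rw [show ((fun x => Prod.snd (x, c x) : Int → Int)) = c from rfl] at *
    have hperm : (T.map c).Perm (S.map c) := (PySem.List.sorted_perm S (fun v => v) false).map c
    have h2 : (T.map c).foldl max 0 = (S.map c).foldl max 0 := hperm.foldl_op_eq
    rw [show T.map (Prod.snd ∘ fun v => (v, c v)) = T.map c from rfl, h2, hSv]
    simp only [List.map_cons, List.foldl_cons]
    rw [show max 0 (c v0) = c v0 from by have := hc_nonneg v0; omega]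
    rw [hmdef, hSv]
    simp only [List.map_cons, PySem.List.max?_id_cons, Option.getD_some]
  -- the filtered candidate lists
  have hcpos : ∀ v : Int, v ∈ T → 1 ≤ c v := by
    intro v hv
    have : v ∈ lst := (hmemlst v).1 ((hTmem v).1 hv)
    have hpos := List.count_pos_iff.mpr this
    show (1 : Int) ≤ (List.count v lst : Int)
    exact_mod_cast hpos
  have hfil : ps.filter (fun p => decide (0 < p.2 ∧ p.2 = M))
      = (T.filter (fun v => c v == m)).map (fun v => (v, c v)) := by
    rw [hpsdef, List.filter_map]
    congr 1
    apply List.filter_congr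
    intro v hv
    have h1 := hcpos v hv
    simp only [Function.comp_def, ← hmM]
    rcases eq_or_ne (c v) m with he | he
    · rw [he] at h1 ⊢
      simp only [beq_self_eq_true, and_true]
      rw [decide_eq_true (by omega : (0:Int) < m)]
    · simp [he]
  set candT : List Int := T.filter (fun v => c v == m) with hcanddef
  -- candT is non-empty
  have hTne : T ≠ [] := by
    rw [hTdef, Ne, PySem.List.sorted_eq_nil_iff]; exact hSne
  obtain ⟨t0, T', hTx⟩ := List.exists_cons_of_ne_nil hTne
  have hpsne : (t0, c t0) ∈ ps := by
    rw [hpsdef, hTx]; simp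
  have hM1 : 1 ≤ M := by
    have h1 := maxC_ge_mem ps 0 (t0, c t0) hpsne
    have h2 := hcpos t0 (by rw [hTx]; exact List.mem_cons_self)
    rw [← hMdef] at h1
    simp only at h1
    omega
  have hcand_ne : candT ≠ [] := by
    rcases maxC_mem ps 0 with h0 | ⟨p, hp, hpe⟩
    · rw [← hMdef] at h0; omega
    · rw [← hMdef] at hpe
      rw [hpsdef] at hp
      obtain ⟨v, hvT, rfl⟩ := List.mem_map.1 hp
      simp only at hpe
      intro hnil
      have := List.filter_eq_nil_iff.1 (hcanddef ▸ hnil) v hvT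
      simp only [beq_iff_eq] at this
      exact this (by rw [hpe, hmM])
  obtain ⟨h0, tl, hcand⟩ := List.exists_cons_of_ne_nil hcand_ne
  -- B returns the head of candT
  have hBval : freq_num_alt lst = h0 := by
    rw [hB2, hfil, hcand]
    rfl
  -- A returns the minimum of cands, which equals the head of candT
  have hpermST : candT.Perm (S.filter (fun v => c v == m)) :=
    (PySem.List.sorted_perm S (fun v => v) false).filter _
  have hcands_ne : S.filter (fun v => c v == m) ≠ [] := by
    intro hnil
    have := hpermST.length_eq
    rw [hcand, hnil] at this
    simp at this
  have hcandT_pair : candT.Pairwise (· < ·) := hTpair.filter _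
  have hh0min : ∀ y ∈ candT, h0 ≤ y := by
    intro y hy
    rw [hcand] at hy
    rcases List.mem_cons.1 hy with rfl | hy'
    · rfl
    · have := (List.pairwise_cons.1 (hcand ▸ hcandT_pair)).1 y hy'
      omega
  cases hmin : PySem.List.min? (S.filter (fun v => c v == m)) (fun v => v) with
  | none =>
    exact absurd ((PySem.List.min?_eq_none_iff _ _).1 hmin) hcands_ne
  | some mn =>
    have hmn_mem : mn ∈ candT := hpermST.mem_iff.2 (PySem.List.min?_mem hmin)
    have hmn_min := PySem.List.min?_isMin hmin
    have hh0_mem : h0 ∈ S.filter (fun v => c v == m) :=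
      hpermST.mem_iff.1 (hcand ▸ List.mem_cons_self)
    have h1 : mn ≤ h0 := hmn_min h0 hh0_mem
    have h2 : h0 ≤ mn := hh0min mn hmn_mem
    have : mn = h0 := le_antisymm h1 h2
    rw [hA, hmin, hBval, Option.getD_some, this]
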